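-- pv_equiv track=rewrite | github.com/jovibroz/ljudbuster | app/main.py | _pick_svt_video_reference
-- ===== SOURCE A (Python) =====
-- from typing import List, Optional, Tuple, Dict, Any
--
-- def _pick_svt_video_reference(video_refs: List[Dict[str, Any]]) -> Optional[str]:
--     if not video_refs:
--         return None
--     preferred_formats = [
--         "hls-cmaf-avc",
--         "hls-ts-full",
--         "hls",
--         "hls-cmaf-full",
--         "dash-avc",
--         "dash",
--     ]
--     for wanted in preferred_formats:
--         for ref in video_refs:
--             fmt = (ref.get("format") or "").lower()
--             u = ref.get("url") or ref.get("resolve") or ref.get("redirect") or ""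
--             if fmt == wanted and (".m3u8" in u or ".mpd" in u):
--                 return u
--     for ref in video_refs:
--         u = ref.get("url") or ref.get("resolve") or ref.get("redirect") or ""
--         if ".m3u8" in u or ".mpd" in u:
--             return u
--     return None
-- ===== SOURCE B (Python) =====
-- def _pick_svt_video_reference(video_refs):
--     preferred_formats = [
--         "hls-cmaf-avc",
--         "hls-ts-full",
--         "hls",
--         "hls-cmaf-full",
--         "dash-avc",
--         "dash",
--     ]
--     by_format = {}
--     first_any = None
--     for ref in video_refs:
--         u = ref.get("url") or ref.get("resolve") or ref.get("redirect") or ""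
--         if ".m3u8" in u or ".mpd" in u:
--             fmt = (ref.get("format") or "").lower()
--             if fmt not in by_format:
--                 by_format[fmt] = u
--             if first_any is None:
--                 first_any = u
--     for wanted in preferred_formats:
--         if wanted in by_format:
--             return by_format[wanted]
--     return first_any
-- ===== Notes on version B (the rewrite author's own statement) =====
-- stated objective: alternative
-- what changed: Single pass over video_refs builds a format->first-valid-url dict plus a first-valid-any fallback, replacing A's six repeated scans (one per preferred format) with one indexing pass and an ordered lookup over the six formats.
import Mathlib
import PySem

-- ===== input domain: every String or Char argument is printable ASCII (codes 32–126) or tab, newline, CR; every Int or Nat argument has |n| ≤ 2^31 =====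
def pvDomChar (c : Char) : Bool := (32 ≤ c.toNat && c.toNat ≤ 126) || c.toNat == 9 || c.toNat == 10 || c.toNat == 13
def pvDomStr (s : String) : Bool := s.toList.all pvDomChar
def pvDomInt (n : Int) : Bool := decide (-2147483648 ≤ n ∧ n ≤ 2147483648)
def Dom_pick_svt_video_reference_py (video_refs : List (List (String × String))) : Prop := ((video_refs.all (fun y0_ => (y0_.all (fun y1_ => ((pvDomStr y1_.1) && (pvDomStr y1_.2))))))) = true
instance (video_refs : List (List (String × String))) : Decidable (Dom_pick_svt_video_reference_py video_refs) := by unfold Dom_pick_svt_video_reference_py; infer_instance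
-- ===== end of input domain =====

-- B builds a format->first-valid-url index plus a first-valid fallback in one pass over
-- video_refs, then does an ordered lookup over the six preferred formats, instead of A's
-- six repeated scans (alternative decomposition; measured cost is similar).


-- shared subexpressions both Pythons spell identically:
-- u = ref.get("url") or ref.get("resolve") or ref.get("redirect") or ""
def pvUrl (ref : List (String × String)) : String :=
  let g := fun (k : String) => PySem.Dict.getD (PySem.Dict.mk ref) k ""
  if g "url" ≠ "" then g "url"
  else if g "resolve" ≠ "" then g "resolve"
  else if g "redirect" ≠ "" then g "redirect"
  else ""
-- fmt = (ref.get("format") or "").lower()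
def pvFmt (ref : List (String × String)) : String :=
  PySem.Str.lower (PySem.Dict.getD (PySem.Dict.mk ref) "format" "")
-- ".m3u8" in u or ".mpd" in u
def pvValid (u : String) : Bool :=
  PySem.Str.isIn ".m3u8" u || PySem.Str.isIn ".mpd" u

def pvPreferred : List String :=
  ["hls-cmaf-avc", "hls-ts-full", "hls", "hls-cmaf-full", "dash-avc", "dash"]

-- ===== PORT A =====
-- inner 'for ref in video_refs' of the preferred-format loop
def aInner (wanted : String) : List (List (String × String)) → Option String
  | [] => none
  | ref :: rest =>
    if pvFmt ref == wanted && pvValid (pvUrl ref) then some (pvUrl ref)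
    else aInner wanted rest

-- 'for wanted in preferred_formats'
def aOuter (refs : List (List (String × String))) : List String → Option String
  | [] => none
  | w :: ws =>
    match aInner w refs with
    | some u => some u
    | none => aOuter refs ws

-- final fallback loop
def aFallback : List (List (String × String)) → Option String
  | [] => none
  | ref :: rest => if pvValid (pvUrl ref) then some (pvUrl ref) else aFallback rest

def pick_svt_video_reference_py (video_refs : List (List (String × String))) : Option String :=
  if video_refs = [] then none
  else
    match aOuter video_refs pvPreferred with
    | some u => some u
    | none => aFallback video_refs

-- ===== PORT B =====
-- loop body: index valid refs by format (first wins), remember first valid url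
def bStep (acc : PySem.Dict String String × Option String) (ref : List (String × String)) :
    PySem.Dict String String × Option String :=
  let u := pvUrl ref
  if pvValid u then
    let fmt := pvFmt ref
    let d := if acc.1.contains fmt then acc.1 else acc.1.insert fmt u
    let fa := match acc.2 with | some v => some v | none => some u
    (d, fa)
  else acc

-- 'for wanted in preferred_formats: if wanted in by_format: return by_format[wanted]'
def bPick (d : PySem.Dict String String) (fa : Option String) : List String → Option String
  | [] => fa
  | w :: ws =>
    match d.get? w with
    | some u => some u
    | none => bPick d fa ws

def pick_svt_video_reference_py_alt (video_refs : List (List (String × String))) : Option String :=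
  let acc := video_refs.foldl bStep (PySem.Dict.empty, none)
  bPick acc.1 acc.2 pvPreferred

-- ===== PRECONDITION & SPEC =====
def Spec_pick_svt_video_reference_py (video_refs : List (List (String × String))) (out : Option String) : Prop := out = pick_svt_video_reference_py_alt video_refs
instance (video_refs : List (List (String × String))) (out : Option String) : Decidable (Spec_pick_svt_video_reference_py video_refs out) := by unfold Spec_pick_svt_video_reference_py; infer_instance

-- ===== CLAIM (what is proved, stated in full; the proofs are below) =====
def Claim_equal_pick_svt_video_reference_py : Prop := ∀ (video_refs : List (List (String × String))), Dom_pick_svt_video_reference_py video_refs → Spec_pick_svt_video_reference_py video_refs (pick_svt_video_reference_py video_refs)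

-- ===== LEMMAS AND PROOFS =====

-- the dict built by the fold looks up to: old entry first, else A's inner scan
theorem bFold_get? (refs : List (List (String × String)))
    (d : PySem.Dict String String) (fa : Option String) (w : String) :
    ((refs.foldl bStep (d, fa)).1).get? w = (d.get? w).or (aInner w refs) := by
  induction refs generalizing d fa with
  | nil => simp [aInner]
  | cons ref rest ih =>
    simp only [List.foldl_cons, bStep, aInner]
    by_cases hv : pvValid (pvUrl ref) = true
    · simp only [hv, if_true]
      by_cases hc : d.contains (pvFmt ref) = true
      · simp only [hc, if_true, ih]
        by_cases hw : pvFmt ref == w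
        · have hwe : pvFmt ref = w := by simpa using hw
          have : (d.get? w).isSome := by
            rw [← hwe, ← PySem.Dict.contains_eq_isSome_get?]; exact hc
          obtain ⟨v, hv2⟩ := Option.isSome_iff_exists.mp this
          simp [hv2, hw]
        · simp [hw]
      · simp only [Bool.not_eq_true] at hc
        simp only [hc, Bool.false_eq_true, if_false, ih]
        by_cases hw : pvFmt ref == w
        · have hwe : pvFmt ref = w := by simpa using hw
          have hdn : d.get? w = none := by
            rw [← hwe]
            rcases h : d.get? (pvFmt ref) with _ | v
            · rfl
            · have hct : d.contains (pvFmt ref) = true := by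
                rw [PySem.Dict.contains_eq_isSome_get?, h]; rfl
              rw [hct] at hc; exact absurd hc (by simp)
          rw [hwe, PySem.Dict.get?_insert_self]
          simp [hdn]
        · have hne : w ≠ pvFmt ref := fun h => hw (by simp [h])
          rw [PySem.Dict.get?_insert_of_ne _ _ hne]
          simp [hw]
    · simp only [Bool.not_eq_true] at hv
      simp [hv, ih]

-- the fallback accumulator of the fold is: old value first, else A's fallback scan
theorem bFold_snd (refs : List (List (String × String)))
    (d : PySem.Dict String String) (fa : Option String) :
    (refs.foldl bStep (d, fa)).2 = fa.or (aFallback refs) := by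
  induction refs generalizing d fa with
  | nil => simp [aFallback]
  | cons ref rest ih =>
    simp only [List.foldl_cons, bStep, aFallback]
    by_cases hv : pvValid (pvUrl ref) = true
    · cases fa <;> simp [hv, ih]
    · simp only [Bool.not_eq_true] at hv
      simp [hv, ih]

-- the ordered lookup equals A's preferred-format loop, given the dict characterisation
theorem bPick_eq (refs : List (List (String × String))) (d : PySem.Dict String String)
    (fa : Option String) (h : ∀ w, d.get? w = aInner w refs) (ws : List String) :
    bPick d fa ws = ((aOuter refs ws).or fa) := by
  induction ws with
  | nil => simp [bPick, aOuter]
  | cons w ws ih =>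
    simp only [bPick, aOuter, h w]
    cases aInner w refs <;> simp [ih]

theorem aInner_nil (w : String) : aInner w [] = none := rfl

theorem aOuter_nil (ws : List String) : aOuter [] ws = none := by
  induction ws with
  | nil => rfl
  | cons w ws ih => simp [aOuter, aInner_nil, ih]

-- ===== VERDICT (by name: the statement is the Claim_ definition above) =====
theorem pick_svt_video_reference_py_spec : Claim_equal_pick_svt_video_reference_py := by
  intro refs _
  show pick_svt_video_reference_py refs = pick_svt_video_reference_py_alt refs
  have hget : ∀ w, ((refs.foldl bStep (PySem.Dict.empty, none)).1).get? w = aInner w refs := by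
    intro w
    rw [bFold_get?]
    simp [PySem.Dict.get?_empty]
  have hsnd : (refs.foldl bStep (PySem.Dict.empty, none)).2 = aFallback refs := by
    rw [bFold_snd]; rfl
  unfold pick_svt_video_reference_py pick_svt_video_reference_py_alt
  rw [bPick_eq refs _ _ hget, hsnd]
  by_cases hnil : refs = []
  · subst hnil
    simp [aOuter_nil, aFallback]
  · simp only [hnil, if_false]
    cases aOuter refs pvPreferred <;> simp
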